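-- pv_equiv track=rewrite | github.com/ffekirnew/a2sv-competitive-programming | 1962-remove-stones-to-minimize-the-total/1962-remove-stones-to-minimize-the-total.py | minStoneSum
-- ===== SOURCE A (Python) =====
-- from typing import List
--
-- import heapq as heap
--
-- def minStoneSum(piles: List[int], k: int) -> int:
--     # have the piles in a max-heap
--     piles = list(map(lambda x: -x, piles))
--     heap.heapify(piles)
--
--     # for the amount of k, execute the operation
--     while k:
--         number = heap.heappop(piles)
--         number += -1 * number // 2
--         heap.heappush(piles, number)
--
--         k -= 1
--
--
--     # make the elements in the piles positive again
--     piles = list(map(lambda x: -x, piles))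
--
--     # return the sum
--     return sum(piles)
-- ===== SOURCE B (Python) =====
-- def minStoneSum(piles, k):
--     piles = list(piles)           # work on a copy; the argument is never mutated
--     for _ in range(k):
--         m = max(piles)
--         i = piles.index(m)
--         piles[i] = m - m // 2     # ceil-halving of the largest pile
--     return sum(piles)
-- ===== Notes on version B (the rewrite author's own statement) =====
-- stated objective: simpler
-- what changed: Replaces the negate-everything max-heap (heapify/heappop/heappush) with a plain copied list and a linear max-scan per operation, writing the ceil-halved value back in place.
import Mathlib
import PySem

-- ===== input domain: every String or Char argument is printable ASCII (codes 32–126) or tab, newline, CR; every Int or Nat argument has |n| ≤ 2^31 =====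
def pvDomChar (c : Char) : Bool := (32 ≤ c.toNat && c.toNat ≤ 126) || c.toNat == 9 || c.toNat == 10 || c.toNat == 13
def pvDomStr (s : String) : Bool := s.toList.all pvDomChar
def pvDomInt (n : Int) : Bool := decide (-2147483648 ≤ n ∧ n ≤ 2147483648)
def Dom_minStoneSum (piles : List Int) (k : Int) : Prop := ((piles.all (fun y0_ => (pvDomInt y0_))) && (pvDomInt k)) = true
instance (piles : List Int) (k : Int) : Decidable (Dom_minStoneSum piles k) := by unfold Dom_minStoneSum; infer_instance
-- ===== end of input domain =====

-- B replaces A's negated max-heap with a plain copied list and a linear max-scan per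
-- operation (simpler, no negation trick); neither implementation mutates the argument.


-- ===== PORT A =====
-- heapq is ported at the level of the heap's contents, which is exact for A's observable
-- result: heappop removes a minimal element of the heap (for Int entries that is the
-- minimum value, so the contents after every heapq call — and hence the final sum — are
-- exactly Python's), heappush adds the element, and heapify only reorders the contents.
def pvHeapPop (h : List Int) : Option (Int × List Int) :=
  match PySem.List.min? h (fun y => y) with
  | none => none                                  -- heappop([]): IndexError
  | some m => some (m, h.erase m)

-- the 'while k' loop; for k < 0 Python diverges (excluded by Pre_), so fuel = k.toNat
def pvLoopA : Nat → List Int → Int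
  | 0, h => (h.map (fun x => -x)).sum
  | n+1, h =>
    match pvHeapPop h with
    | none => 0                                   -- IndexError; excluded by Pre_
    | some (m, rest) => pvLoopA n ((m + PySem.Int.floordiv (-1 * m) 2) :: rest)

def minStoneSum (piles : List Int) (k : Int) : Int :=
  pvLoopA k.toNat (piles.map (fun x => -x))

-- ===== PORT B =====
-- the 'for _ in range(k)' loop of Source B
def pvLoopB : Nat → List Int → Int
  | 0, l => l.sum
  | n+1, l =>
    match PySem.List.max? l (fun y => y) with
    | none => 0                                   -- max([]): ValueError; excluded by Pre_
    | some m =>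
      match PySem.List.index? l m with
      | none => 0                                 -- unreachable: the max is a member
      | some i => pvLoopB n (l.set i (m - PySem.Int.floordiv m 2))

def minStoneSum_alt (piles : List Int) (k : Int) : Int :=
  pvLoopB k.toNat piles

-- ===== PRECONDITION & SPEC =====
-- Pre_ excludes k < 0 (A's 'while k' loop never terminates) and empty piles with k > 0
-- (A's heappop raises IndexError; B's max raises ValueError there too).
def Pre_minStoneSum (piles : List Int) (k : Int) : Prop := 0 ≤ k ∧ (piles = [] → k = 0)
instance (piles : List Int) (k : Int) : Decidable (Pre_minStoneSum piles k) := by unfold Pre_minStoneSum; infer_instance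
def pvWitness_minStoneSum : List Int × Int := ([5, 4, 9], 2)

def Spec_minStoneSum (piles : List Int) (k : Int) (out : Int) : Prop := out = minStoneSum_alt piles k
instance (piles : List Int) (k : Int) (out : Int) : Decidable (Spec_minStoneSum piles k out) := by unfold Spec_minStoneSum; infer_instance

-- ===== CLAIM (what is proved, stated in full; the proofs are below) =====
def Claim_equal_minStoneSum : Prop := ∀ (piles : List Int) (k : Int), Dom_minStoneSum piles k → Pre_minStoneSum piles k → Spec_minStoneSum piles k (minStoneSum piles k)

-- ===== LEMMAS AND PROOFS =====

-- the heap's minimum is the negation of the list's maximum, given h ~ map (-·) l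
lemma pv_min_eq_neg_max (h l : List Int) (hp : h.Perm (l.map (fun x => -x)))
    (m M : Int) (hm : PySem.List.min? h (fun y => y) = some m)
    (hM : PySem.List.max? l (fun y => y) = some M) : m = -M := by
  have hmem : m ∈ h := PySem.List.min?_mem hm
  have hmin : ∀ y ∈ h, m ≤ y := fun y hy => PySem.List.min?_isMin hm y hy
  have hMmem : M ∈ l := PySem.List.max?_mem hM
  have hMmax : ∀ y ∈ l, y ≤ M := fun y hy => PySem.List.max?_isMax hM y hy
  have h1 : m ≤ -M := hmin _ (hp.mem_iff.mpr (List.mem_map.mpr ⟨M, hMmem, rfl⟩))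
  have h2 : -M ≤ m := by
    rcases List.mem_map.mp (hp.mem_iff.mp hmem) with ⟨a, ha, rfl⟩
    have := hMmax a ha; omega
  omega

lemma pv_loop_eq : ∀ (n : Nat) (h l : List Int), h.Perm (l.map (fun x => -x)) →
    (l ≠ [] ∨ n = 0) → pvLoopA n h = pvLoopB n l := by
  intro n
  induction n with
  | zero =>
    intro h l hp _
    have : (h.map (fun x => -x)).Perm l := by
      have := hp.map (fun x => -x)
      simpa [Function.comp] using this
    simp [pvLoopA, pvLoopB, this.sum_eq]
  | succ n ih =>
    intro h l hp hne
    have hl : l ≠ [] := hne.resolve_right (by omega)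
    obtain ⟨M, hM⟩ : ∃ M, PySem.List.max? l (fun y => y) = some M := by
      cases hMx : PySem.List.max? l (fun y => y) with
      | none => exact absurd ((PySem.List.max?_eq_none_iff _ _).mp hMx) hl
      | some M => exact ⟨M, rfl⟩
    obtain ⟨m, hm⟩ : ∃ m, PySem.List.min? h (fun y => y) = some m := by
      cases hmx : PySem.List.min? h (fun y => y) with
      | none =>
        have hh : h = [] := (PySem.List.min?_eq_none_iff _ _).mp hmx
        subst hh
        have := hp.symm.eq_nil
        simp [hl] at this
      | some m => exact ⟨m, rfl⟩
    have hmM : m = -M := pv_min_eq_neg_max h l hp m M hm hM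
    have hMl : M ∈ l := PySem.List.max?_mem hM
    obtain ⟨i, hi⟩ : ∃ i, PySem.List.index? l M = some i := by
      cases hix : PySem.List.index? l M with
      | none => exact absurd ((PySem.List.index?_eq_none_iff _ _).mp hix) (by simpa using hMl)
      | some i => exact ⟨i, rfl⟩
    obtain ⟨pre, suf, hsplit, hlen, hnotpre⟩ := (PySem.List.index?_eq_some_iff _ _ _).mp hi
    simp only [pvLoopA, pvLoopB, pvHeapPop, hm, hM, hi]
    set v : Int := M - PySem.Int.floordiv M 2 with hv
    have hset : l.set i v = pre ++ v :: suf := by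
      subst hsplit hlen; simp
    have herase : l.erase M = pre ++ suf := by
      subst hsplit
      rw [List.erase_append_right _ hnotpre, List.erase_cons_head]
    have hval : m + PySem.Int.floordiv (-1 * m) 2 = -v := by
      rw [hmM, hv, show (-1 * -M) = M by ring]; ring
    rw [hval, hset]
    apply ih
    · -- permutation of the new states
      have he : (h.erase m).Perm ((pre ++ suf).map (fun x => -x)) := by
        have h1 : (h.erase m).Perm ((l.map (fun x => -x)).erase m) := hp.erase m
        have h2 : (l.map (fun x => -x)).erase m = (l.erase M).map (fun x => -x) := by
          rw [hmM, List.map_erase (f := fun x : Int => -x) (fun a b hab => neg_injective hab) l]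
        rw [h2, herase] at h1
        exact h1
      refine (he.cons (-v)).trans ?_
      simp only [List.map_append, List.map_cons]
      exact List.perm_middle.symm
    · left
      subst hsplit; simp

-- ===== VERDICT (by name: the statement is the Claim_ definition above) =====
theorem minStoneSum_spec : Claim_equal_minStoneSum := by
  intro piles k _ hpre
  unfold Spec_minStoneSum minStoneSum minStoneSum_alt
  rcases hpre with ⟨hk, hemp⟩
  apply pv_loop_eq
  · exact List.Perm.refl _
  · by_cases hp : piles = []
    · right; rw [hemp hp]; rfl
    · left; exact hp
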